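-- pv_equiv track=rewrite | github.com/xuzpgroup/ZianZhang | FatigueData-AM2022/TEXTract/RE_AMfatigue/regular_expr.py | _merge_equal_item
-- ===== SOURCE A (Python) =====
-- def _merge_equal_item(v0,u0,s0):
--     v=[]
--     u=[]
--     s=[]
--     for i in range(0,len(v0)):
--         flag=0
--         if not (v0[i] in v):
--             v.append(v0[i])
--             u.append(u0[i])
--             s.append(s0[i])
--         else:
--             for j in range(0,len(v)):
--                 if (v0[i]==v[j]):
--                     s[j]=s[j]+' | '+s0[i]
--                     flag=1
--                     break
--             if not flag:
--                 v.append(v0[i])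
--                 u.append(u0[i])
--                 s.append(s0[i])
--     return v,u,s
-- ===== SOURCE B (Python) =====
-- def _merge_equal_item(v0, u0, s0):
--     # staged: index the first occurrences, then gather and join per key
--     firsts = [i for i in range(len(v0)) if v0[i] not in v0[:i]]
--     v = [v0[i] for i in firsts]
--     u = [u0[i] for i in firsts]
--     s = [' | '.join([s0[j] for j in range(len(v0)) if v0[j] == v0[i]])
--          for i in firsts]
--     return v, u, s
-- ===== Notes on version B (the rewrite author's own statement) =====
-- stated objective: simpler
-- what changed: Replaces A's scan-and-mutate over three parallel output lists (per-element dispatch with an inner index scan that edits s in place) by a staged, mutation-free computation: first the list of first-occurrence indices, then three comprehensions over it, the s field gathered per key by joining all matching s0 entries at once.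
import Mathlib
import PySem

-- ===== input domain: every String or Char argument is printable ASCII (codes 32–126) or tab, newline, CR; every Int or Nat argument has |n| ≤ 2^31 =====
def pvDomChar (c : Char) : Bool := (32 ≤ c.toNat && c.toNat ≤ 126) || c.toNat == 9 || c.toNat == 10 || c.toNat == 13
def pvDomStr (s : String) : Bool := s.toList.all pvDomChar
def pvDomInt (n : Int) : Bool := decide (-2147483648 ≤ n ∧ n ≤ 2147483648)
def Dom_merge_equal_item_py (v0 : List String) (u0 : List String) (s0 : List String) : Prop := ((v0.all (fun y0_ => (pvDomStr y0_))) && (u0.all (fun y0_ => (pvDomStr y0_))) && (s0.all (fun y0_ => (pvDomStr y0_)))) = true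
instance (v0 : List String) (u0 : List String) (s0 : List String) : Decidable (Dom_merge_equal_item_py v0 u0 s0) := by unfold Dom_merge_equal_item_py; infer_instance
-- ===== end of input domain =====

-- B replaces A's scan-and-mutate over three parallel output lists by a staged, mutation-free
-- computation (first-occurrence indices, then per-key gather-and-join); equality of the return
-- values is proved on all inputs where the Python A returns.

-- ===== PORT A =====
-- inner 'for j in range(0, len(v)): if v0[i]==v[j]: s[j]=s[j]+' | '+s0[i]; flag=1; break'
-- (v and s walked together; they always have equal length in A's loop)
def pvInnerA (x ss : String) : List String → List String → List String × Bool
  | [], s => (s, false)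
  | _ :: _, [] => ([], false)
  | vj :: vt, sj :: st =>
    if x = vj then ((sj ++ " | " ++ ss) :: st, true)
    else
      let r := pvInnerA x ss vt st
      (sj :: r.1, r.2)

-- one iteration of A's outer loop, on the state (v, u, s) and the values (v0[i], u0[i], s0[i])
def pvStepA (st : List String × List String × List String) (t : String × String × String) :
    List String × List String × List String :=
  if ¬ (t.1 ∈ st.1) then
    (st.1 ++ [t.1], st.2.1 ++ [t.2.1], st.2.2 ++ [t.2.2])
  else
    let r := pvInnerA t.1 t.2.2 st.1 st.2.2
    if r.2 then (st.1, st.2.1, r.1)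
    else (st.1 ++ [t.1], st.2.1 ++ [t.2.1], r.1 ++ [t.2.2])

def merge_equal_item_py (v0 : List String) (u0 : List String) (s0 : List String) :
    List String × List String × List String :=
  (PySem.List.pyRange 0 (v0.length : Int) 1).foldl
    (fun st i => pvStepA st
      (PySem.List.pyGetD v0 i "", PySem.List.pyGetD u0 i "", PySem.List.pyGetD s0 i ""))
    ([], [], [])

-- ===== PORT B =====
-- firsts = [i for i in range(len(v0)) if v0[i] not in v0[:i]], then three comprehensions over it
def merge_equal_item_py_alt (v0 : List String) (u0 : List String) (s0 : List String) :
    List String × List String × List String :=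
  let firsts := (PySem.List.pyRange 0 (v0.length : Int) 1).filter
      (fun i => !((PySem.List.slice v0 none (some i)).contains (PySem.List.pyGetD v0 i "")))
  (firsts.map (fun i => PySem.List.pyGetD v0 i ""),
   firsts.map (fun i => PySem.List.pyGetD u0 i ""),
   firsts.map (fun i => PySem.Str.join " | "
     (((PySem.List.pyRange 0 (v0.length : Int) 1).filter
         (fun j => PySem.List.pyGetD v0 j "" == PySem.List.pyGetD v0 i "")).map
       (fun j => PySem.List.pyGetD s0 j ""))))

-- ===== PRECONDITION & SPEC =====
-- Pre_ is exactly where Python A returns: it reads s0[i] for every i < len(v0) and u0[i] at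
-- every first occurrence of v0[i]; outside this both Pythons raise IndexError.
def Pre_merge_equal_item_py (v0 : List String) (u0 : List String) (s0 : List String) : Prop :=
  v0.length ≤ s0.length ∧
  ∀ i : Nat, i < v0.length → v0.getD i "" ∉ v0.take i → i < u0.length
instance (v0 : List String) (u0 : List String) (s0 : List String) : Decidable (Pre_merge_equal_item_py v0 u0 s0) := by unfold Pre_merge_equal_item_py; infer_instance
def pvWitness_merge_equal_item_py : List String × List String × List String :=
  (["a", "b", "a"], ["u1", "u2", "u3"], ["s1", "s2", "s3"])
def Spec_merge_equal_item_py (v0 : List String) (u0 : List String) (s0 : List String) (out : List String × List String × List String) : Prop := out = merge_equal_item_py_alt v0 u0 s0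
instance (v0 : List String) (u0 : List String) (s0 : List String) (out : List String × List String × List String) : Decidable (Spec_merge_equal_item_py v0 u0 s0 out) := by unfold Spec_merge_equal_item_py; infer_instance

-- ===== CLAIM (what is proved, stated in full; the proofs are below) =====
def Claim_equal_merge_equal_item_py : Prop := ∀ (v0 : List String) (u0 : List String) (s0 : List String), Dom_merge_equal_item_py v0 u0 s0 → Pre_merge_equal_item_py v0 u0 s0 → Spec_merge_equal_item_py v0 u0 s0 (merge_equal_item_py v0 u0 s0)

-- ===== LEMMAS AND PROOFS =====

-- the common list of per-iteration reads (v0[i], u0[i], s0[i])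
def pvTriples (v0 u0 s0 : List String) : List (String × String × String) :=
  (List.range v0.length).map (fun k => (v0.getD k "", u0.getD k "", s0.getD k ""))

lemma pvFoldl_pyRange3 {σ : Type} (v0 u0 s0 : List String)
    (g : σ → String × String × String → σ) (init : σ) :
    (PySem.List.pyRange 0 (v0.length : Int) 1).foldl
      (fun st i => g st (PySem.List.pyGetD v0 i "", PySem.List.pyGetD u0 i "", PySem.List.pyGetD s0 i ""))
      init
    = (pvTriples v0 u0 s0).foldl g init := by
  simp [PySem.List.pyRange_one, pvTriples, List.foldl_map, PySem.List.pyGetD_natCast]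

-- A's three parallel lists, read off a list of merged records (key, first u, s-parts)
def pvEmit (items : List (String × String × List String)) :
    List String × List String × List String :=
  (items.map (·.1), items.map (·.2.1), items.map (fun p => PySem.Str.join " | " p.2.2))

-- one merge step on the record list: append a part to every record whose key matches, else a new record
def pvGStep (items : List (String × String × List String)) (t : String × String × String) :
    List (String × String × List String) :=
  if t.1 ∈ items.map (·.1) then
    items.map (fun p => if p.1 = t.1 then (p.1, p.2.1, p.2.2 ++ [t.2.2]) else p)
  else items ++ [(t.1, t.2.1, [t.2.2])]

lemma pvChars_join_append_singleton (sep : List Char) (l : List (List Char)) (c : List Char)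
    (h : l ≠ []) :
    PySem.Chars.join sep (l ++ [c]) = PySem.Chars.join sep l ++ sep ++ c := by
  induction l with
  | nil => exact absurd rfl h
  | cons a t ih =>
    cases t with
    | nil =>
      simp [PySem.Chars.join_cons_cons, PySem.Chars.join_singleton]
    | cons b t' =>
      have hih := ih (by simp)
      rw [List.cons_append, List.cons_append]
      rw [List.cons_append] at hih
      rw [PySem.Chars.join_cons_cons, hih, PySem.Chars.join_cons_cons]
      simp [List.append_assoc]

lemma pvJoin_append_singleton (ps : List String) (h : ps ≠ []) (ss : String) :
    PySem.Str.join " | " (ps ++ [ss]) = PySem.Str.join " | " ps ++ " | " ++ ss := by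
  apply String.toList_inj.mp
  simp only [PySem.Str.toList_join, String.toList_append, List.map_append, List.map_cons,
    List.map_nil]
  exact pvChars_join_append_singleton _ _ _ (by simpa using h)

lemma pvJoin_singleton (ss : String) : PySem.Str.join " | " [ss] = ss := by
  simp [PySem.Str.join]

-- the inner loop finds the unique matching index and rewrites exactly that join
lemma pvInnerA_spec (x ss : String) (items : List (String × String × List String))
    (hnd : (items.map (·.1)).Nodup) (hne : ∀ p ∈ items, p.2.2 ≠ [])
    (hx : x ∈ items.map (·.1)) :
    pvInnerA x ss (items.map (·.1)) (items.map (fun p => PySem.Str.join " | " p.2.2))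
    = ((items.map (fun p => if p.1 = x then (p.1, p.2.1, p.2.2 ++ [ss]) else p)).map
        (fun p => PySem.Str.join " | " p.2.2), true) := by
  induction items with
  | nil => simp at hx
  | cons p rest ih =>
    simp only [List.map_cons, pvInnerA]
    by_cases h : x = p.1
    · simp only [if_pos h, if_pos h.symm]
      have hrest : rest.map (fun q => if q.1 = x then (q.1, q.2.1, q.2.2 ++ [ss]) else q) = rest := by
        conv_rhs => rw [← List.map_id rest]
        apply List.map_congr_left
        intro q hq
        have : q.1 ≠ x := by
          intro hq1
          have hp1 : p.1 ∈ rest.map (·.1) := by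
            rw [← h, ← hq1]; exact List.mem_map_of_mem hq
          exact (List.nodup_cons.mp hnd).1 hp1
        simp [this]
      rw [hrest]
      have hjoin := pvJoin_append_singleton p.2.2 (hne p (by simp)) ss
      simp [hjoin]
    · simp only [if_neg h, if_neg (fun hh => h (Eq.symm hh))]
      have hx' : x ∈ rest.map (·.1) := by
        rcases List.mem_cons.mp hx with h1 | h1
        · exact absurd h1 h
        · exact h1
      rw [ih (List.nodup_cons.mp hnd).2 (fun q hq => hne q (List.mem_cons_of_mem _ hq)) hx']

lemma pvStep_commute (items : List (String × String × List String))
    (t : String × String × String) (hnd : (items.map (·.1)).Nodup)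
    (hne : ∀ p ∈ items, p.2.2 ≠ []) :
    pvStepA (pvEmit items) t = pvEmit (pvGStep items t) := by
  by_cases hmem : t.1 ∈ items.map (·.1)
  · have hinner := pvInnerA_spec t.1 t.2.2 items hnd hne hmem
    have hA : pvStepA (pvEmit items) t
        = (items.map (·.1), items.map (·.2.1),
           (items.map (fun p => if p.1 = t.1 then (p.1, p.2.1, p.2.2 ++ [t.2.2]) else p)).map
             (fun p => PySem.Str.join " | " p.2.2)) := by
      simp [pvStepA, pvEmit, hinner, hmem]
    rw [hA]
    simp only [pvEmit, pvGStep, if_pos hmem, List.map_map, Prod.mk.injEq]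
    refine ⟨?_, ?_, trivial⟩
    · apply (List.map_congr_left ?_).symm
      intro p _
      by_cases hpk : p.1 = t.1 <;> simp [Function.comp, hpk]
    · apply (List.map_congr_left ?_).symm
      intro p _
      by_cases hpk : p.1 = t.1 <;> simp [Function.comp, hpk]
  · simp only [pvStepA, pvEmit, pvGStep, if_neg hmem]
    rw [if_pos (by simpa using hmem)]
    simp [pvJoin_singleton]

lemma pvGStep_nodup (items : List (String × String × List String))
    (t : String × String × String) (hnd : (items.map (·.1)).Nodup) :
    ((pvGStep items t).map (·.1)).Nodup := by
  unfold pvGStep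
  by_cases hmem : t.1 ∈ items.map (·.1)
  · rw [if_pos hmem]
    have : (items.map (fun p => if p.1 = t.1 then (p.1, p.2.1, p.2.2 ++ [t.2.2]) else p)).map (·.1)
        = items.map (·.1) := by
      rw [List.map_map]
      apply List.map_congr_left
      intro p _
      by_cases hpk : p.1 = t.1 <;> simp [Function.comp, hpk]
    rw [this]; exact hnd
  · rw [if_neg hmem]
    simp only [List.map_append, List.map_cons, List.map_nil]
    refine List.Nodup.append hnd (by simp) ?_
    simp [List.disjoint_singleton, hmem]

lemma pvGStep_parts_ne (items : List (String × String × List String))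
    (t : String × String × String) (hne : ∀ p ∈ items, p.2.2 ≠ []) :
    ∀ p ∈ pvGStep items t, p.2.2 ≠ [] := by
  unfold pvGStep
  by_cases hmem : t.1 ∈ items.map (·.1)
  · rw [if_pos hmem]
    intro p hp
    rcases List.mem_map.mp hp with ⟨q, hq, hqp⟩
    by_cases hqk : q.1 = t.1
    · rw [← hqp]; simp [hqk]
    · rw [← hqp]; simp only [if_neg hqk]; exact hne q hq
  · rw [if_neg hmem]
    intro p hp
    rcases List.mem_append.mp hp with h | h
    · exact hne p h
    · simp at h; subst h; simp

lemma pvFold_commute (T : List (String × String × String)) :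
    ∀ items : List (String × String × List String), ((items.map (·.1)).Nodup) →
    (∀ p ∈ items, p.2.2 ≠ []) →
    T.foldl pvStepA (pvEmit items) = pvEmit (T.foldl pvGStep items) := by
  induction T with
  | nil => intro items _ _; rfl
  | cons t T ih =>
    intro items hnd hne
    simp only [List.foldl_cons]
    rw [pvStep_commute items t hnd hne]
    exact ih _ (pvGStep_nodup items t hnd) (pvGStep_parts_ne items t hne)

-- B's intermediate data, in index space
def pvFirsts (v0 : List String) (n : Nat) : List Nat :=
  (List.range n).filter (fun i => !((v0.take i).contains (v0.getD i "")))

def pvPartsN (v0 s0 : List String) (n : Nat) (x : String) : List String :=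
  ((List.range n).filter (fun j => v0.getD j "" == x)).map (fun j => s0.getD j "")

lemma pvMem_firsts (v0 : List String) (n : Nat) (h : n ≤ v0.length) (x : String) :
    x ∈ (pvFirsts v0 n).map (fun i => v0.getD i "") ↔ x ∈ v0.take n := by
  constructor
  · rintro hm
    rcases List.mem_map.mp hm with ⟨i, hi, rfl⟩
    have hin : i < n := List.mem_range.mp (List.mem_of_mem_filter hi)
    have hilen : i < v0.length := lt_of_lt_of_le hin h
    have h1 : (v0.take n)[i]'(by simp [hilen, hin]) = v0[i] := List.getElem_take
    have : v0.getD i "" = (v0.take n)[i]'(by simp [hilen, hin]) := by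
      rw [h1, List.getD_eq_getElem v0 "" hilen]
    rw [this]
    exact List.getElem_mem _
  · intro hm
    have hP : ∃ j, j < n ∧ v0.getD j "" = x := by
      rcases List.mem_iff_getElem.mp hm with ⟨j, hj, hjx⟩
      have hjn : j < n := lt_of_lt_of_le hj (by simp)
      have hjlen : j < v0.length := by
        have := hj; simp at this; exact this.2
      refine ⟨j, hjn, ?_⟩
      rw [List.getD_eq_getElem v0 "" hjlen, ← List.getElem_take (h := hj), hjx]
    classical
    let i0 := Nat.find hP
    have hspec := Nat.find_spec hP
    have hi0n : i0 < n := hspec.1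
    have hi0x : v0.getD i0 "" = x := hspec.2
    have hfirst : ¬ (v0.getD i0 "" ∈ v0.take i0) := by
      intro hmem
      rcases List.mem_iff_getElem.mp hmem with ⟨j, hj, hjx⟩
      have hji0 : j < i0 := lt_of_lt_of_le hj (by simp)
      have hjlen : j < v0.length := by have := hj; simp at this; exact this.2
      have : v0.getD j "" = x := by
        rw [List.getD_eq_getElem v0 "" hjlen, ← List.getElem_take (h := hj), hjx, hi0x]
      exact Nat.find_min hP hji0 ⟨lt_trans hji0 hi0n, this⟩
    apply List.mem_map.mpr
    refine ⟨i0, ?_, hi0x⟩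
    apply List.mem_filter.mpr
    refine ⟨List.mem_range.mpr hi0n, ?_⟩
    simpa using hfirst

-- characterization of the merge state after the first n records, by first-occurrence indices
lemma pvTakeMem (v0 : List String) {i n : Nat} (hin : i < n) (hilen : i < v0.length) :
    v0.getD i "" ∈ v0.take n := by
  have h1 : (v0.take n)[i]'(by simp [hilen, hin]) = v0[i] := List.getElem_take
  have h2 : v0.getD i "" = (v0.take n)[i]'(by simp [hilen, hin]) := by
    rw [h1, List.getD_eq_getElem v0 "" hilen]
  rw [h2]
  exact List.getElem_mem _

lemma pvCharG (v0 u0 s0 : List String) :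
    ∀ n : Nat, n ≤ v0.length →
    ((List.range n).map (fun k => (v0.getD k "", u0.getD k "", s0.getD k ""))).foldl pvGStep []
    = (pvFirsts v0 n).map (fun i => (v0.getD i "", u0.getD i "", pvPartsN v0 s0 n (v0.getD i ""))) := by
  intro n
  induction n with
  | zero => intro _; simp [pvFirsts]
  | succ n ih =>
    intro hle
    have hn : n ≤ v0.length := Nat.le_of_succ_le hle
    rw [List.range_succ, List.map_append, List.foldl_append, ih hn]
    simp only [List.map_cons, List.map_nil, List.foldl_cons, List.foldl_nil]
    have hkeys : ((pvFirsts v0 n).map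
        (fun i => (v0.getD i "", u0.getD i "", pvPartsN v0 s0 n (v0.getD i "")))).map (·.1)
        = (pvFirsts v0 n).map (fun i => v0.getD i "") := by
      rw [List.map_map]
      exact List.map_congr_left (fun i _ => rfl)
    by_cases hnew : v0.getD n "" ∈ v0.take n
    · -- value already seen: pvGStep modifies every matching record; firsts unchanged
      have hmem : v0.getD n "" ∈ ((pvFirsts v0 n).map
          (fun i => (v0.getD i "", u0.getD i "", pvPartsN v0 s0 n (v0.getD i "")))).map (·.1) := by
        rw [hkeys]; exact (pvMem_firsts v0 n hn _).mpr hnew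
      rw [pvGStep, if_pos hmem]
      have hfirsts : pvFirsts v0 (n + 1) = pvFirsts v0 n := by
        unfold pvFirsts
        rw [List.range_succ, List.filter_append]
        simp only [List.filter_cons, List.filter_nil]
        rw [List.getD_eq_getElem?_getD] at hnew
        simp [hnew]
      rw [hfirsts, List.map_map]
      apply List.map_congr_left
      intro i hi
      simp only [Function.comp]
      by_cases heq : v0.getD i "" = v0.getD n ""
      · rw [if_pos heq]
        have hbeq : (v0[n]?.getD "" == v0[i]?.getD "") = true := by
          simp only [beq_iff_eq, ← List.getD_eq_getElem?_getD]
          exact heq.symm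
        unfold pvPartsN
        rw [List.range_succ, List.filter_append, List.map_append]
        simp [hbeq]
      · rw [if_neg heq]
        have hbeq : (v0[n]?.getD "" == v0[i]?.getD "") = false := by
          simp only [beq_eq_false_iff_ne, ne_eq, ← List.getD_eq_getElem?_getD]
          exact fun hc2 => heq hc2.symm
        unfold pvPartsN
        rw [List.range_succ, List.filter_append, List.map_append]
        simp [hbeq]
    · -- fresh value: pvGStep appends a new record; n joins the firsts
      have hmem : ¬ v0.getD n "" ∈ ((pvFirsts v0 n).map
          (fun i => (v0.getD i "", u0.getD i "", pvPartsN v0 s0 n (v0.getD i "")))).map (·.1) := by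
        rw [hkeys]; exact fun hc => hnew ((pvMem_firsts v0 n hn _).mp hc)
      rw [pvGStep, if_neg hmem]
      have hfirsts : pvFirsts v0 (n + 1) = pvFirsts v0 n ++ [n] := by
        unfold pvFirsts
        rw [List.range_succ, List.filter_append]
        simp only [List.filter_cons, List.filter_nil]
        rw [List.getD_eq_getElem?_getD] at hnew
        simp [hnew]
      rw [hfirsts, List.map_append]
      congr 1
      · -- old records keep their parts: index n does not match any first-seen value
        apply List.map_congr_left
        intro i hi
        have hin : i < n := List.mem_range.mp (List.mem_of_mem_filter hi)
        have hbeq : (v0[n]?.getD "" == v0[i]?.getD "") = false := by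
          simp only [beq_eq_false_iff_ne, ne_eq, ← List.getD_eq_getElem?_getD]
          intro hc2
          exact hnew (hc2 ▸ pvTakeMem v0 hin (lt_of_lt_of_le hin hn))
        unfold pvPartsN
        rw [List.range_succ, List.filter_append, List.map_append]
        simp [hbeq]
      · -- the new record starts with exactly [s0[n]]
        have hnil : (List.range n).filter (fun j => v0.getD j "" == v0.getD n "") = [] := by
          apply List.filter_eq_nil_iff.mpr
          intro j hj
          have hjn : j < n := List.mem_range.mp hj
          simp only [beq_iff_eq]
          intro hc2
          exact hnew (hc2 ▸ pvTakeMem v0 hjn (lt_of_lt_of_le hjn hn))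
        unfold pvPartsN
        simp only [List.map_cons, List.map_nil]
        rw [List.range_succ, List.filter_append, hnil]
        simp

-- B's port, rewritten into index space
lemma pvAlt_normal (v0 u0 s0 : List String) :
    merge_equal_item_py_alt v0 u0 s0
    = ((pvFirsts v0 v0.length).map (fun i => v0.getD i ""),
       (pvFirsts v0 v0.length).map (fun i => u0.getD i ""),
       (pvFirsts v0 v0.length).map (fun i =>
         PySem.Str.join " | " (pvPartsN v0 s0 v0.length (v0.getD i "")))) := by
  unfold merge_equal_item_py_alt pvFirsts pvPartsN
  simp [PySem.List.pyRange_one, List.filter_map, List.map_map, Function.comp_def,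
    PySem.List.slice_to_natCast, PySem.List.pyGetD_natCast]

-- ===== VERDICT (by name: the statement is the Claim_ definition above) =====
theorem merge_equal_item_py_spec : Claim_equal_merge_equal_item_py := by
  intro v0 u0 s0 _ _
  unfold Spec_merge_equal_item_py merge_equal_item_py
  rw [pvFoldl_pyRange3]
  have hstart : (([], [], []) : List String × List String × List String) = pvEmit [] := rfl
  rw [hstart, pvFold_commute (pvTriples v0 u0 s0) [] (by simp) (by simp)]
  unfold pvTriples
  rw [pvCharG v0 u0 s0 v0.length (le_refl _)]
  rw [pvAlt_normal]
  simp [pvEmit, List.map_map, Function.comp]
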